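-- pv_equiv track=rewrite | github.com/jyothi1jyo/python_programs | small_prime.py | last_n_primes
-- ===== SOURCE A (Python) =====
-- PRIMES_TO_SHOW = 10
--
-- def last_n_primes(primes, n):
--     show = []
--     i = n
--     # Start at n and work downward keeping track of primes.
--     # Loop should also ensure we don't drop below zero.
--     while len(show) < PRIMES_TO_SHOW and i >= 0:
--         if primes[i]:
--             show.append(i)
--         i -= 1
--     return show
-- ===== SOURCE B (Python) =====
-- PRIMES_TO_SHOW = 10
--
-- def last_n_primes(primes, n):
--     idx = [i for i in range(n + 1) if primes[i]]
--     return idx[-PRIMES_TO_SHOW:][::-1]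
-- ===== Notes on version B (the rewrite author's own statement) =====
-- stated objective: simpler
-- what changed: Replaces A's downward while-loop with counter and early-exit length guard by a forward comprehension over range(n+1) followed by a tail slice [-10:] reversed into descending order.
import Mathlib
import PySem

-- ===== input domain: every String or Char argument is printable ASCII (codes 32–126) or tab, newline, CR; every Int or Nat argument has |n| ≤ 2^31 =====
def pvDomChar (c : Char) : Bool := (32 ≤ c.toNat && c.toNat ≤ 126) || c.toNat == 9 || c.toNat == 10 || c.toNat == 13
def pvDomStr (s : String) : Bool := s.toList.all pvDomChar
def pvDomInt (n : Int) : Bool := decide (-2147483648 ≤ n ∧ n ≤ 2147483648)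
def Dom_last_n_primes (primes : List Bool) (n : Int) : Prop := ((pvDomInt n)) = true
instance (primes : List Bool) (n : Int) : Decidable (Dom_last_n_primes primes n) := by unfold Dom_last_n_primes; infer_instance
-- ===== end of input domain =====

-- B replaces A's downward counter loop with a forward comprehension plus a tail slice reversed (objective: simpler).

-- ===== PORT A =====
-- A's while-loop: fuel bounds the iteration count (the loop runs at most n.toNat + 1 times).
def pvALoop (primes : List Bool) (acc : List Int) (i : Int) : Nat → List Int
  | 0 => acc
  | fuel + 1 =>
    if acc.length < 10 ∧ 0 ≤ i then
      pvALoop primes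
        (if (PySem.List.pyGet? primes i).getD false then acc ++ [i] else acc)
        (i - 1) fuel
    else acc

def last_n_primes (primes : List Bool) (n : Int) : List Int :=
  pvALoop primes [] n (n.toNat + 1)

-- ===== PORT B =====
def last_n_primes_alt (primes : List Bool) (n : Int) : List Int :=
  (PySem.List.slice
    ((PySem.List.pyRange 0 (n + 1) 1).filter
      (fun i => (PySem.List.pyGet? primes i).getD false))
    (some (-10)) none).reverse

-- ===== PRECONDITION & SPEC =====
-- Pre_ excludes exactly the inputs where Python A raises IndexError (primes[i] with n ≥ len(primes)); B raises there too.
def Pre_last_n_primes (primes : List Bool) (n : Int) : Prop := n < primes.length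
instance (primes : List Bool) (n : Int) : Decidable (Pre_last_n_primes primes n) := by unfold Pre_last_n_primes; infer_instance
def pvWitness_last_n_primes : List Bool × Int := ([true, false, true, true], 3)

def Spec_last_n_primes (primes : List Bool) (n : Int) (out : List Int) : Prop := out = last_n_primes_alt primes n
instance (primes : List Bool) (n : Int) (out : List Int) : Decidable (Spec_last_n_primes primes n out) := by unfold Spec_last_n_primes; infer_instance

-- ===== CLAIM (what is proved, stated in full; the proofs are below) =====
def Claim_equal_last_n_primes : Prop := ∀ (primes : List Bool) (n : Int), Dom_last_n_primes primes n → Pre_last_n_primes primes n → Spec_last_n_primes primes n (last_n_primes primes n)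

-- ===== LEMMAS AND PROOFS =====

-- Descending list of indices k, k-1, …, 0 satisfying p.
def descL (p : Int → Bool) : Nat → List Int
  | 0 => if p 0 then [(0 : Int)] else []
  | k + 1 => (if p ((k : Int) + 1) then [((k : Int) + 1)] else []) ++ descL p k

def dList (p : Int → Bool) (i : Int) : List Int :=
  if 0 ≤ i then descL p i.toNat else []

theorem dList_step (p : Int → Bool) (i : Int) (hi : 0 ≤ i) :
    dList p i = (if p i then [i] else []) ++ dList p (i - 1) := by
  rcases Int.eq_ofNat_of_zero_le hi with ⟨k, rfl⟩
  cases k with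
  | zero => simp [dList, descL]
  | succ m =>
    have ha : (0 : Int) ≤ (m : Int) + 1 := by omega
    have hb : (0 : Int) ≤ (m : Int) + 1 - 1 := by omega
    have h2 : ((m : Int) + 1).toNat = m + 1 := by omega
    have h3 : ((m : Int) + 1 - 1).toNat = m := by omega
    simp only [dList, Nat.cast_add, Nat.cast_one, if_pos ha, if_pos hb, h2, h3]
    rw [descL]

theorem aLoop_eq (primes : List Bool) :
    ∀ (fuel : Nat) (acc : List Int) (i : Int), i < (fuel : Int) → acc.length ≤ 10 →
      pvALoop primes acc i fuel =
        acc ++ (dList (fun j => (PySem.List.pyGet? primes j).getD false) i).take (10 - acc.length) := by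
  intro fuel
  induction fuel with
  | zero =>
    intro acc i hi _
    have : dList (fun j => (PySem.List.pyGet? primes j).getD false) i = [] := by
      unfold dList; rw [if_neg (by omega)]
    simp [pvALoop, this]
  | succ f ih =>
    intro acc i hi hacc
    rw [pvALoop]
    by_cases hlen : acc.length < 10
    · by_cases hpos : 0 ≤ i
      · rw [if_pos ⟨hlen, hpos⟩]
        set p : Int → Bool := fun j => (PySem.List.pyGet? primes j).getD false with hp
        rw [dList_step p i hpos]
        by_cases hpi : p i
        · rw [if_pos hpi]
          rw [ih (acc ++ [i]) (i - 1) (by omega) (by simp; omega)]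
          have h10 : 10 - acc.length = (10 - (acc ++ [i]).length) + 1 := by simp; omega
          simp [h10, hpi, List.append_assoc]
        · rw [if_neg hpi]
          rw [ih acc (i - 1) (by omega) hacc]
          simp [hpi]
      · rw [if_neg (by tauto)]
        have : dList (fun j => (PySem.List.pyGet? primes j).getD false) i = [] := by
          unfold dList; rw [if_neg hpos]
        simp [this]
    · rw [if_neg (by tauto)]
      have : 10 - acc.length = 0 := by omega
      simp [this]

-- reverse of the ascending filtered range is the descending filtered list
theorem reverse_filter_range (p : Int → Bool) :
    ∀ k : Nat, (((List.range (k + 1)).map (fun j : Nat => (j : Int))).filter p).reverse = descL p k := by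
  intro k
  induction k with
  | zero => simp [descL]; by_cases h : p 0 <;> simp [h]
  | succ m ih =>
    rw [List.range_succ, List.map_append, List.filter_append, List.reverse_append, ih]
    by_cases h : p ((m : Int) + 1)
    · simp [descL, h]
    · simp [descL, h]

theorem last_n_primes_eq (primes : List Bool) (n : Int) :
    last_n_primes primes n = last_n_primes_alt primes n := by
  have hA : last_n_primes primes n =
      (dList (fun j => (PySem.List.pyGet? primes j).getD false) n).take 10 := by
    unfold last_n_primes
    rw [aLoop_eq primes (n.toNat + 1) [] n (by omega) (by simp)]
    simp
  have hrev : ((PySem.List.pyRange 0 (n + 1) 1).filter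
        (fun i => (PySem.List.pyGet? primes i).getD false)).reverse =
      dList (fun j => (PySem.List.pyGet? primes j).getD false) n := by
    by_cases hn : 0 ≤ n
    · have h1 : n + 1 = ((n.toNat + 1 : Nat) : Int) := by omega
      rw [h1, PySem.List.pyRange_zero_natCast]
      unfold dList
      rw [if_pos hn]
      exact reverse_filter_range _ n.toNat
    · have h0 : PySem.List.pyRange 0 (n + 1) 1 = [] := by
        simp [PySem.List.pyRange_one]
        omega
      rw [h0]
      unfold dList
      rw [if_neg hn]
      rfl
  rw [hA]
  unfold last_n_primes_alt
  rw [PySem.List.slice_from_neg_ofNat _ 10 (by omega), ← hrev]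
  exact List.take_reverse

-- ===== VERDICT (by name: the statement is the Claim_ definition above) =====
theorem last_n_primes_spec : Claim_equal_last_n_primes := by
  intro primes n _ _
  unfold Spec_last_n_primes
  exact last_n_primes_eq primes n
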